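-- pv_equiv track=rewrite | github.com/ShoCo2/Google-Foobar-Answers | Level 2/LovelyLuckyLAMBs.py | solution
-- ===== SOURCE A (Python) =====
-- def solution(total_lambs):
--     lambs = total_lambs
--     minimum = 0
--     while lambs >= 0:
--         lambs -= pow(2, minimum)
--         minimum += 1
--     maximum = 1
--     nextlambcost = 1
--     prevlambcost = 1
--     while total_lambs > 0:
--         maximum += 1
--         total_lambs -= nextlambcost
--         tempcost = nextlambcost
--         nextlambcost += prevlambcost
--         prevlambcost = tempcost
--     return maximum - minimum
-- ===== SOURCE B (Python) =====
-- def solution(total_lambs):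
--     # minimum henchmen (powers of 2): closed form instead of a subtraction loop
--     minimum = max(total_lambs + 1, 0).bit_length()
--     # maximum henchmen (Fibonacci payouts 1,2,3,5,...): advance a Fibonacci pair;
--     # b - 2 is the cumulative cost of the first (maximum) henchmen
--     maximum = 1
--     a, b = 1, 2
--     while b < total_lambs + 2:
--         a, b = b, a + b
--         maximum += 1
--     return maximum - minimum
-- ===== Notes on version B (the rewrite author's own statement) =====
-- stated objective: alternative
-- what changed: The powers-of-2 subtraction loop is replaced by the closed form max(total_lambs+1,0).bit_length(), and the Fibonacci loop is restructured to advance a Fibonacci pair and compare it against total_lambs+2 instead of destructively subtracting each cost from a remaining-lambs counter.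
import Mathlib
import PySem

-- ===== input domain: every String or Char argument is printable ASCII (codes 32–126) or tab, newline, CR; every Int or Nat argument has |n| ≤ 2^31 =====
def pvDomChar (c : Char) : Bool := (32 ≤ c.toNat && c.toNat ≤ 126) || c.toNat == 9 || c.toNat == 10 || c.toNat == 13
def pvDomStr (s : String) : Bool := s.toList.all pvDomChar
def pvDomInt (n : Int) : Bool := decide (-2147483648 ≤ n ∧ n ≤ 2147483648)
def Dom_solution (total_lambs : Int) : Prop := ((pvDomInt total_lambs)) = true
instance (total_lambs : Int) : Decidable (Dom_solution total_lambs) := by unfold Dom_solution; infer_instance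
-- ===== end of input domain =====

-- B replaces A's powers-of-2 loop by a bit_length closed form and restructures the
-- Fibonacci loop to advance a pair and compare, instead of subtracting from a counter.

-- ===== PORT A =====
-- first while-loop of A: while lambs >= 0: lambs -= 2**minimum; minimum += 1
def solLoop1 (lambs : Int) (minimum : Nat) : Nat :=
  if lambs ≥ 0 then solLoop1 (lambs - 2 ^ minimum) (minimum + 1) else minimum
termination_by (lambs + 1).toNat
decreasing_by
  have h1 : (1:Int) ≤ 2 ^ minimum := one_le_pow₀ (by norm_num)
  omega

-- second while-loop of A; the costs stay positive (needed for termination), carried as Nat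
def solLoop2 (total : Int) (maximum : Int) (next prev : Nat) (hn : 1 ≤ next) : Int :=
  if total > 0 then
    solLoop2 (total - (next : Int)) (maximum + 1) (next + prev) next
      (le_trans hn (Nat.le_add_right _ _))
  else maximum
termination_by total.toNat
decreasing_by omega

def solution (total_lambs : Int) : Int :=
  solLoop2 total_lambs 1 1 1 (le_refl 1) - (solLoop1 total_lambs 0 : Int)

-- ===== PORT B =====
-- Source B's while-loop: while b < total_lambs + 2: a, b = b, a + b; maximum += 1
def altFib (n : Int) (maximum : Int) (a b : Nat) (ha : 1 ≤ a) (hb : 1 ≤ b) : Int :=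
  if (b : Int) < n + 2 then
    altFib n (maximum + 1) b (a + b) hb (le_trans ha (Nat.le_add_right _ _))
  else maximum
termination_by (n + 2 - b).toNat
decreasing_by omega

def solution_alt (total_lambs : Int) : Int :=
  let minimum : Nat := Nat.size (max (total_lambs + 1) 0).toNat   -- bit_length
  altFib total_lambs 1 1 2 (le_refl 1) (by norm_num) - (minimum : Int)

-- ===== PRECONDITION & SPEC =====
def Spec_solution (total_lambs : Int) (out : Int) : Prop := out = solution_alt total_lambs
instance (total_lambs : Int) (out : Int) : Decidable (Spec_solution total_lambs out) := by unfold Spec_solution; infer_instance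

-- ===== CLAIM (what is proved, stated in full; the proofs are below) =====
def Claim_equal_solution : Prop := ∀ (total_lambs : Int), Dom_solution total_lambs → Spec_solution total_lambs (solution total_lambs)

-- ===== LEMMAS AND PROOFS =====

-- loop1 invariant: the quantity lambs + 2^m is preserved and determines the result.
theorem size_of_bounds (x : Int) (m : Nat) (hlt : x < 2 ^ m) (hge : (2:Int) ^ m ≤ 2 * x) :
    Nat.size x.toNat = m := by
  cases m with
  | zero =>
    exfalso
    simp only [pow_zero] at hlt hge
    omega
  | succ k =>
    have hp : (2:Int) ^ (k + 1) = 2 * 2 ^ k := by ring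
    have hc : ((2 ^ k : Nat) : Int) = (2:Int) ^ k := by push_cast; ring
    have hc2 : ((2 ^ (k+1) : Nat) : Int) = (2:Int) ^ (k+1) := by push_cast; ring
    have h1 : 2 ^ k ≤ x.toNat := by omega
    have h2 : x.toNat < 2 ^ (k + 1) := by omega
    exact le_antisymm (Nat.size_le.mpr h2) (Nat.lt_size.mpr h1)

theorem solLoop1_size : ∀ (N : Nat) (lambs : Int) (m : Nat),
    (lambs + 1).toNat ≤ N → (2:Int) ^ m ≤ 2 * (lambs + 2 ^ m) →
    solLoop1 lambs m = Nat.size (lambs + 2 ^ m).toNat := by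
  intro N
  induction N with
  | zero =>
    intro lambs m hN h2
    have hneg : lambs < 0 := by omega
    rw [solLoop1, if_neg (by omega : ¬ lambs ≥ 0)]
    exact (size_of_bounds _ m (by omega) h2).symm
  | succ N ih =>
    intro lambs m hN h2
    rw [solLoop1]
    by_cases h : lambs ≥ 0
    · rw [if_pos h]
      have hone : (1:Int) ≤ 2 ^ m := one_le_pow₀ (by norm_num)
      have hp : (2:Int) ^ (m + 1) = 2 * 2 ^ m := by ring
      have := ih (lambs - 2 ^ m) (m + 1) (by omega) (by omega)
      rw [this]
      congr 1
      omega
    · rw [if_neg h]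
      exact (size_of_bounds _ m (by omega) h2).symm

-- bisimulation of the two Fibonacci loops: total = n + 2 - b, b = next + prev
theorem loop2_eq_fib : ∀ (N : Nat) (n total maximum : Int) (next prev b : Nat)
    (hn : 1 ≤ next) (hb : 1 ≤ b),
    total.toNat ≤ N → total = n + 2 - (b : Int) → b = next + prev →
    solLoop2 total maximum next prev hn = altFib n maximum next b hn hb := by
  intro N
  induction N with
  | zero =>
    intro n total maximum next prev b hn hb hN hE hB
    rw [solLoop2, altFib, if_neg (by omega : ¬ total > 0),
        if_neg (by omega : ¬ ((b : Int) < n + 2))]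
  | succ N ih =>
    intro n total maximum next prev b hn hb hN hE hB
    subst hB
    rw [solLoop2, altFib]
    by_cases h : total > 0
    · rw [if_pos h, if_pos (by omega : ((next + prev : Nat) : Int) < n + 2)]
      exact ih n (total - (next : Int)) (maximum + 1) (next + prev) next
        (next + (next + prev)) (le_trans hn (Nat.le_add_right _ _))
        (le_trans hn (Nat.le_add_right _ _)) (by omega) (by push_cast; omega) (by omega)
    · rw [if_neg h, if_neg (by omega : ¬ (((next + prev : Nat) : Int) < n + 2))]

-- ===== VERDICT (by name: the statement is the Claim_ definition above) =====
theorem solution_spec : Claim_equal_solution := by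
  intro n _
  unfold Spec_solution solution solution_alt
  have hmax : solLoop2 n 1 1 1 (le_refl 1) = altFib n 1 1 2 (le_refl 1) (by norm_num) := by
    have := loop2_eq_fib n.toNat n n 1 1 1 2 (le_refl 1) (by norm_num)
      (le_refl _) (by norm_num) (by norm_num)
    simpa using this
  have hmin : solLoop1 n 0 = Nat.size (max (n + 1) 0).toNat := by
    by_cases h : 0 ≤ n
    · have := solLoop1_size (n + 1).toNat n 0 (le_refl _) (by norm_num; omega)
      rw [this]
      congr 1
      omega
    · rw [solLoop1]
      simp only [ge_iff_le, if_neg (by omega : ¬ (0:Int) ≤ n)]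
      have : (max (n + 1) 0).toNat = 0 := by omega
      rw [this, Nat.size_zero]
  rw [hmax, hmin]
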